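-- pv_equiv track=rewrite | github.com/enhe/wenyanwen | parse.py | get_clean_p
-- ===== SOURCE A (Python) =====
-- def get_clean_p(p):  # 获得清除所有标记后的原文
--     fin_str = ''
--     count_head = 0
--     count_end = 0
--     for ch in p:
--         if ch == '<':
--             count_head += 1
--         elif ch == '>':
--             count_end += 1
--         else:
--             if count_head == count_end:
--                 fin_str += ch
--     return fin_str
-- ===== SOURCE B (Python) =====
-- def get_clean_p(p):  # segment scanner: jump to next bracket, emit whole slices at depth 0
--     parts = []
--     depth = 0
--     i = 0
--     n = len(p)
--     while i < n:
--         j = i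
--         while j < n and p[j] != '<' and p[j] != '>':
--             j += 1
--         if depth == 0:
--             parts.append(p[i:j])
--         if j < n:
--             depth += 1 if p[j] == '<' else -1
--         i = j + 1
--     return ''.join(parts)
-- ===== Notes on version B (the rewrite author's own statement) =====
-- stated objective: alternative
-- what changed: Replaces A's per-character filter with two counters by a segment scanner: an outer loop that jumps to the next bracket character with an inner scan, appends the whole inter-bracket slice when the current depth is 0, and updates a single signed depth once per bracket.
import Mathlib
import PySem

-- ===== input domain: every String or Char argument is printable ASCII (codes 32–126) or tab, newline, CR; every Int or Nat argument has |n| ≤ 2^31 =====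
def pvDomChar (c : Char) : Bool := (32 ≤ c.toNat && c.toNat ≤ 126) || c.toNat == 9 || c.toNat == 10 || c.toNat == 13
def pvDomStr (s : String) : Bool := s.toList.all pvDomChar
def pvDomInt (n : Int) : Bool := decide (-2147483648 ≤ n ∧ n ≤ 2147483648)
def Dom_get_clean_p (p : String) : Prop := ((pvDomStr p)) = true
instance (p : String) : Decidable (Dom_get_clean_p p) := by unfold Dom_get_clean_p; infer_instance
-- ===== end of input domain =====

-- B replaces A's per-character two-counter filter by a segment scanner that jumps
-- to the next bracket and emits whole inter-bracket slices at depth 0; alternative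
-- decomposition, same result.


-- ===== PORT A =====
-- state = (fin_str as char list, count_head, count_end)
def stepA (st : List Char × Int × Int) (ch : Char) : List Char × Int × Int :=
  if ch = '<' then (st.1, st.2.1 + 1, st.2.2)
  else if ch = '>' then (st.1, st.2.1, st.2.2 + 1)
  else if st.2.1 = st.2.2 then (st.1 ++ [ch], st.2.1, st.2.2)
  else st

def get_clean_p (p : String) : String :=
  String.ofList (p.toList.foldl stepA ([], 0, 0)).1

-- ===== PORT B =====
-- 'is a bracket' test of Source B's inner-loop condition
def isBrk (c : Char) : Bool := c == '<' || c == '>'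

-- outer while loop of Source B on the remaining suffix: the inner scan is the
-- takeWhile/dropWhile split at the next bracket; the kept slice is the
-- takeWhile part when depth = 0; depth is updated once per bracket found.
mutual
def segB : List Char → Int → List Char
  | [], _ => []
  | c :: tl, depth =>
    (if depth = 0 then (c :: tl).takeWhile (fun x => !isBrk x) else []) ++
    segBrest ((c :: tl).dropWhile (fun x => !isBrk x)) depth
termination_by cs _ => 2 * cs.length + 1
decreasing_by
  have hle := List.length_dropWhile_le (p := fun x => !isBrk x) (l := c :: tl)
  simp at hle ⊢
  omega

-- the 'if j < n: update depth' tail of each outer iteration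
def segBrest : List Char → Int → List Char
  | [], _ => []
  | b :: rs, depth => segB rs (depth + (if b = '<' then 1 else -1))
termination_by l _ => 2 * l.length
decreasing_by
  simp
  omega
end

def get_clean_p_alt (p : String) : String :=
  String.ofList (segB p.toList 0)

-- ===== PRECONDITION & SPEC =====
def Spec_get_clean_p (p : String) (out : String) : Prop := out = get_clean_p_alt p
instance (p : String) (out : String) : Decidable (Spec_get_clean_p p out) := by unfold Spec_get_clean_p; infer_instance

-- ===== CLAIM (what is proved, stated in full; the proofs are below) =====
def Claim_equal_get_clean_p : Prop := ∀ (p : String), Dom_get_clean_p p → Spec_get_clean_p p (get_clean_p p)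

-- ===== LEMMAS AND PROOFS =====

-- intermediate form: per-character recursion carrying the running balance
def zf : List Char → Int → List Char
  | [], _ => []
  | c :: cs, b =>
    if c = '<' then zf cs (b + 1)
    else if c = '>' then zf cs (b - 1)
    else (if b = 0 then [c] else []) ++ zf cs b

theorem foldA_eq (cs : List Char) (acc : List Char) (h e : Int) :
    (cs.foldl stepA (acc, h, e)).1 = acc ++ zf cs (h - e) := by
  induction cs generalizing acc h e with
  | nil => simp [zf]
  | cons c cs ih =>
    rw [List.foldl_cons]
    by_cases hc : c = '<'
    · subst hc
      have hs : stepA (acc, h, e) '<' = (acc, h + 1, e) := by simp [stepA]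
      rw [hs, ih]
      have : h + 1 - e = h - e + 1 := by ring
      simp [zf, this]
    · by_cases hc2 : c = '>'
      · subst hc2
        have hs : stepA (acc, h, e) '>' = (acc, h, e + 1) := by simp [stepA]
        rw [hs, ih]
        have : h - (e + 1) = h - e - 1 := by ring
        simp [zf, this]
      · by_cases heq : h = e
        · have hs : stepA (acc, h, e) c = (acc ++ [c], h, e) := by simp [stepA, hc, hc2, heq]
          rw [hs, ih]
          simp [zf, hc, hc2, heq]
        · have hs : stepA (acc, h, e) c = (acc, h, e) := by simp [stepA, hc, hc2, heq]
          have hb : ¬ (h - e = 0) := by omega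
          rw [hs, ih]
          simp [zf, hc, hc2, hb]

-- zf over a bracket-free prefix emits the whole prefix iff the balance is 0
theorem zf_nonbrk (l rest : List Char) (b : Int) (hl : ∀ c ∈ l, ¬ isBrk c = true) :
    zf (l ++ rest) b = (if b = 0 then l else []) ++ zf rest b := by
  induction l with
  | nil => simp
  | cons c l ih =>
    have hc := hl c (by simp)
    have h1 : ¬ c = '<' := by intro hh; subst hh; simp [isBrk] at hc
    have h2 : ¬ c = '>' := by intro hh; subst hh; simp [isBrk] at hc
    simp only [List.cons_append, zf, h1, h2]
    rw [ih (fun x hx => hl x (by simp [hx]))]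
    by_cases hb : b = 0 <;> simp [hb]

theorem dropWhile_head_false (p : Char → Bool) :
    ∀ (l : List Char) (b : Char) (rs : List Char), l.dropWhile p = b :: rs → p b = false := by
  intro l
  induction l with
  | nil => intro b rs h; simp at h
  | cons a tl ih =>
    intro b rs h
    rw [List.dropWhile_cons] at h
    split at h
    · exact ih _ _ h
    · rename_i ha
      cases h
      simpa using ha

theorem segB_eq_zf : ∀ (n : ℕ) (cs : List Char), cs.length ≤ n → ∀ b, segB cs b = zf cs b := by
  intro n
  induction n with
  | zero =>
    intro cs hcs b
    have : cs = [] := List.eq_nil_of_length_eq_zero (by omega)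
    subst this; simp [segB, zf]
  | succ n ih =>
    intro cs hcs b
    match cs with
    | [] => simp [segB, zf]
    | c :: cs' =>
      rw [segB]
      have hsplit := List.takeWhile_append_dropWhile (p := fun x => !isBrk x) (l := c :: cs')
      have htw : ∀ x ∈ (c :: cs').takeWhile (fun x => !isBrk x), ¬ isBrk x = true := by
        intro x hx
        have := List.mem_takeWhile_imp hx
        simpa using this
      conv_rhs => rw [← hsplit]
      rw [zf_nonbrk _ _ _ htw]
      cases hdrop : (c :: cs').dropWhile (fun x => !isBrk x) with
      | nil => simp [segBrest, zf]
      | cons b' rs =>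
        have hb' := dropWhile_head_false _ _ _ _ hdrop
        have hbrk : isBrk b' = true := by simpa using hb'
        have hlen : rs.length ≤ n := by
          have hle := List.length_dropWhile_le (p := fun x => !isBrk x) (l := c :: cs')
          rw [hdrop] at hle
          simp at hle hcs
          omega
        rw [segBrest]
        by_cases hlt : b' = '<'
        · subst hlt
          rw [ih rs hlen]
          simp [zf]
        · have hgt : b' = '>' := by
            simp [isBrk, hlt] at hbrk
            exact hbrk
          subst hgt
          rw [ih rs hlen]
          simp [zf, sub_eq_add_neg]

-- ===== VERDICT (by name: the statement is the Claim_ definition above) =====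
theorem get_clean_p_spec : Claim_equal_get_clean_p := by
  intro p _
  show _ = _
  simp only [get_clean_p, get_clean_p_alt]
  rw [foldA_eq, segB_eq_zf p.toList.length p.toList le_rfl]
  simp
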